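-- pv_equiv track=rewrite | github.com/gatech-genemark/StartLink-exp | sbsp/code/python/lib/sbsp_general/shelf.py | sort_sequences_by_first_non_gap_and_consensus
-- ===== SOURCE A (Python) =====
-- from collections import Counter
--
-- def sort_sequences_by_first_non_gap_and_consensus(list_seqs):
--     # type: (List[str]) -> List[str]
--
--     def first_non_gap(l_seq):
--         # type: (str) -> int
--         for p in range(len(l_seq)):
--             if l_seq[p] != "-":
--                 return p
--
--         raise ValueError("Sequence is all gaps")
--
--     pos_to_list_seqs = dict()
--     for l in list_seqs:
--         p = first_non_gap(l)
--         if p not in pos_to_list_seqs.keys():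
--             pos_to_list_seqs[p] = list()
--
--         pos_to_list_seqs[p].append(l)
--
--
--     # reappend into single list and sort per position
--     output = list()
--     output_counts = list()
--     for p in sorted(pos_to_list_seqs.keys()):
--         # get counts per item
--         counter = Counter(pos_to_list_seqs[p])
--         sorted_counter = sorted([(x, counter[x]) for x in counter], key= lambda v: v[0])
--
--         output += [x[0] for x in sorted_counter]
--         output_counts += [x[1] for x in sorted_counter]
--
--     return output, output_counts
-- ===== SOURCE B (Python) =====
-- from collections import Counter
--
-- def sort_sequences_by_first_non_gap_and_consensus(list_seqs):
--     def first_non_gap(l_seq):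
--         for p in range(len(l_seq)):
--             if l_seq[p] != "-":
--                 return p
--         raise ValueError("Sequence is all gaps")
--
--     counter = Counter(list_seqs)
--     output = sorted(counter, key=lambda s: (first_non_gap(s), s))
--     output_counts = [counter[s] for s in output]
--     return output, output_counts
-- ===== Notes on version B (the rewrite author's own statement) =====
-- stated objective: simpler
-- what changed: Replaces A's two-level group-by-position dict with per-group Counters and per-group sorts by one global Counter plus a single sort of the unique sequences keyed by (first_non_gap, sequence).
import Mathlib
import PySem

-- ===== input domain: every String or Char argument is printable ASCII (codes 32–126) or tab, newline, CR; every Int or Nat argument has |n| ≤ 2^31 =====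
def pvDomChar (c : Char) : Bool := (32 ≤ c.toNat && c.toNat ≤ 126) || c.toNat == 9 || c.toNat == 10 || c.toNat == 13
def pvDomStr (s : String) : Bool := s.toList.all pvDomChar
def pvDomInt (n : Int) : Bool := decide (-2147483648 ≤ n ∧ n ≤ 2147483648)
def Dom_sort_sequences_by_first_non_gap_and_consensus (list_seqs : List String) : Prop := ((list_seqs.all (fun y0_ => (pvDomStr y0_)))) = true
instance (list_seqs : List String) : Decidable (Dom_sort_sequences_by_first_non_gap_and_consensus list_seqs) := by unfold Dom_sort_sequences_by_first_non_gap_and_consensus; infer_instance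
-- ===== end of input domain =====

-- B replaces A's group-by-first-non-gap dict (with a Counter and a sort per group) by one global
-- Counter and a single sort of the unique sequences keyed by (first_non_gap, sequence): simpler.

-- ===== PORT A =====
-- first_non_gap: the Python index loop; none = ValueError("Sequence is all gaps"), excluded by Pre_.
def pvFngGo (l : List Char) (p : Int) : Option Int :=
  match l with
  | [] => none
  | c :: rest => if c ≠ '-' then some p else pvFngGo rest (p + 1)

def pvFirstNonGap (s : String) : Option Int := pvFngGo s.toList 0

def sort_sequences_by_first_non_gap_and_consensus (list_seqs : List String) : List String × List Int :=
  let pos_to_list_seqs : PySem.Dict Int (List String) :=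
    list_seqs.foldl (fun d l =>
      let p := (pvFirstNonGap l).getD 0      -- none = ValueError, outside Pre_
      let d := if ¬ (d.contains p = true) then d.insert p ([] : List String) else d
      d.modify p [] (fun g => g ++ [l])) PySem.Dict.empty
  (PySem.List.sorted pos_to_list_seqs.keys (fun x => x) false).foldl (fun acc p =>
      let counter := PySem.Dict.counter (pos_to_list_seqs.getD p [])
      let sorted_counter :=
        PySem.List.sorted (counter.keys.map (fun x => (x, counter.getD x 0))) (fun v => v.1) false
      (acc.1 ++ sorted_counter.map (fun x => x.1), acc.2 ++ sorted_counter.map (fun x => x.2)))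
    ([], [])

-- ===== PORT B =====
def sort_sequences_by_first_non_gap_and_consensus_alt (list_seqs : List String) : List String × List Int :=
  let counter := PySem.Dict.counter list_seqs
  let output :=
    PySem.List.sorted2 counter.keys (fun s => (pvFirstNonGap s).getD 0) (fun s => s) false
  (output, output.map (fun s => counter.getD s 0))

-- ===== PRECONDITION & SPEC =====
-- Pre_ excludes exactly the inputs containing an all-gap (or empty) sequence, on which the Python
-- raises ValueError("Sequence is all gaps") — in A and in B alike.
def Pre_sort_sequences_by_first_non_gap_and_consensus (list_seqs : List String) : Prop :=
  list_seqs.all (fun s => s.toList.any (fun c => c != '-')) = true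
instance (list_seqs : List String) : Decidable (Pre_sort_sequences_by_first_non_gap_and_consensus list_seqs) := by unfold Pre_sort_sequences_by_first_non_gap_and_consensus; infer_instance

def pvWitness_sort_sequences_by_first_non_gap_and_consensus : List String :=
  ["-ab", "a--", "-ab", "--c", "a--"]

def Spec_sort_sequences_by_first_non_gap_and_consensus (list_seqs : List String) (out : List String × List Int) : Prop := out = sort_sequences_by_first_non_gap_and_consensus_alt list_seqs
instance (list_seqs : List String) (out : List String × List Int) : Decidable (Spec_sort_sequences_by_first_non_gap_and_consensus list_seqs out) := by unfold Spec_sort_sequences_by_first_non_gap_and_consensus; infer_instance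

-- ===== CLAIM (what is proved, stated in full; the proofs are below) =====
def Claim_equal_sort_sequences_by_first_non_gap_and_consensus : Prop := ∀ (list_seqs : List String), Dom_sort_sequences_by_first_non_gap_and_consensus list_seqs → Pre_sort_sequences_by_first_non_gap_and_consensus list_seqs → Spec_sort_sequences_by_first_non_gap_and_consensus list_seqs (sort_sequences_by_first_non_gap_and_consensus list_seqs)

-- ===== LEMMAS AND PROOFS =====

-- the total first-non-gap key both ports use
def pvFngD (s : String) : Int := (pvFirstNonGap s).getD 0

-- A's conditional-insert-then-append step is a single Dict.modify
theorem pv_step_eq (d : PySem.Dict Int (List String)) (l : String) :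
    (if ¬ (d.contains (pvFngD l) = true) then d.insert (pvFngD l) ([] : List String) else d).modify
        (pvFngD l) [] (fun g => g ++ [l])
      = d.modify (pvFngD l) [] (fun g => g ++ [l]) := by
  by_cases h : d.contains (pvFngD l) = true
  · simp [h]
  · have h' : d.contains (pvFngD l) = false := by simpa using h
    rw [if_pos h]
    simp only [PySem.Dict.modify, PySem.Dict.getD_insert_self, PySem.Dict.insert_insert_self]
    rw [PySem.Dict.getD_of_not_contains d _ h']

def pvDictOf (xs : List String) : PySem.Dict Int (List String) :=
  xs.foldl (fun d l => d.modify (pvFngD l) [] (fun g => g ++ [l])) PySem.Dict.empty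

theorem pvDictOf_getD (xs : List String) (q : Int) :
    (pvDictOf xs).getD q [] = xs.filter (fun l => pvFngD l == q) := by
  unfold pvDictOf
  rw [show xs.foldl (fun d l => d.modify (pvFngD l) [] (fun g => g ++ [l])) PySem.Dict.empty
      = (xs.map (fun l => (pvFngD l, l))).foldl
          (fun d (p : Int × String) => d.modify p.1 [] (fun g => g ++ [p.2])) PySem.Dict.empty
    from by rw [List.foldl_map]]
  rw [PySem.Dict.getD_foldl_modify_append]
  simp [List.filter_map, Function.comp_def]

theorem pvDictOf_keys (xs : List String) :
    (pvDictOf xs).keys = PySem.Set.ofList (xs.map pvFngD) := by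
  unfold pvDictOf
  rw [PySem.Dict.keys_foldl_modify_key]
  rw [PySem.Dict.keys_empty, PySem.Set.update_nil_left]

-- A's per-group "sorted counter items" is the sorted group paired with counts
theorem pv_block_eq (g : List String) :
    PySem.List.sorted
        ((PySem.Dict.counter g).keys.map (fun x => (x, (PySem.Dict.counter g).getD x 0)))
        (fun v => v.1) false
      = (PySem.List.sorted (PySem.Set.ofList g) (fun x => x) false).map
          (fun x => (x, (g.count x : Int))) := by
  have hmap : (PySem.Dict.counter g).keys.map (fun x => (x, (PySem.Dict.counter g).getD x 0))
      = (PySem.Set.ofList g).map (fun x => (x, (g.count x : Int))) := by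
    simp [PySem.Dict.keys_counter, PySem.Dict.getD_counter]
  rw [hmap]
  apply PySem.List.sorted_eq_of_perm_of_pairwise_lt
  · exact (PySem.List.sorted_perm _ _ _).map _
  · exact List.Pairwise.map _ (fun a b h => h) (PySem.List.sorted_ofList_pairwise_lt g)

-- the lexicographic key both programs sort by
def pvKey (s : String) : Int ×ₗ String := toLex (pvFngD s, s)

-- sorted2 with keys (k1, k2) is sorted with the lexicographic key
theorem pv_sorted2_eq_sorted_lex {α : Type} (xs : List α) (k1 : α → Int) (k2 : α → String) :
    PySem.List.sorted2 xs k1 k2 false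
      = PySem.List.sorted xs (fun x => toLex (k1 x, k2 x)) false := by
  have hb : (fun a b => decide (k1 a < k1 b) || (!decide (k1 b < k1 a) && decide (k2 a < k2 b)))
      = (fun a b => decide (toLex (k1 a, k2 a) < toLex (k1 b, k2 b))) := by
    funext a b
    simp only [Prod.Lex.toLex_lt_toLex]
    rcases lt_trichotomy (k1 a) (k1 b) with h | h | h
    · simp [h]
    · simp [h]
    · simp [h, not_lt_of_gt h, ne_of_gt h]
  show xs.foldl (fun acc x => PySem.List.insertBy _ x acc) [] = _
  rw [hb]; rfl

def pvSortedPos (xs : List String) : List Int :=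
  PySem.List.sorted (PySem.Set.ofList (xs.map pvFngD)) (fun x => x) false

def pvBlk (xs : List String) (p : Int) : List String :=
  PySem.List.sorted (PySem.Set.ofList (xs.filter (fun l => pvFngD l == p))) (fun x => x) false

theorem pv_mem_blk {xs : List String} {p : Int} {x : String} :
    x ∈ pvBlk xs p ↔ x ∈ xs ∧ pvFngD x = p := by
  unfold pvBlk
  rw [PySem.List.mem_sorted, PySem.Set.mem_ofList, List.mem_filter]
  simp

theorem pv_A_eq (xs : List String) :
    sort_sequences_by_first_non_gap_and_consensus xs
      = ((pvSortedPos xs).flatMap (fun p => pvBlk xs p),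
         (pvSortedPos xs).flatMap (fun p => (pvBlk xs p).map (fun x => (xs.count x : Int)))) := by
  unfold sort_sequences_by_first_non_gap_and_consensus
  have hdict : xs.foldl (fun d l =>
      let p := (pvFirstNonGap l).getD 0
      let d := if ¬ (d.contains p = true) then d.insert p ([] : List String) else d
      d.modify p [] (fun g => g ++ [l])) PySem.Dict.empty = pvDictOf xs := by
    unfold pvDictOf
    refine PySem.List.foldl_congr_mem xs _ _ PySem.Dict.empty ?_
    intro d l _
    exact pv_step_eq d l
  simp only [hdict, pvDictOf_keys, pvDictOf_getD]
  have hblk : ∀ p, PySem.List.sorted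
      ((PySem.Dict.counter (xs.filter (fun l => pvFngD l == p))).keys.map
        (fun x => (x, (PySem.Dict.counter (xs.filter (fun l => pvFngD l == p))).getD x 0)))
      (fun v => v.1) false
      = (pvBlk xs p).map (fun x => (x, (xs.count x : Int))) := by
    intro p
    rw [pv_block_eq]
    unfold pvBlk
    apply List.map_congr_left
    intro x hx
    have hx' : x ∈ xs.filter (fun l => pvFngD l == p) := by
      rw [PySem.List.mem_sorted, PySem.Set.mem_ofList] at hx
      exact hx
    have hp : pvFngD x = p := by simpa using (List.mem_filter.1 hx').2
    have : (xs.filter (fun l => pvFngD l == p)).count x = xs.count x := by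
      rw [List.count_filter]
      simp [hp]
    rw [this]
  simp only [hblk]
  rw [PySem.List.foldl_prod_mk
    (f := fun (o : List String) (p : Int) =>
      o ++ ((pvBlk xs p).map (fun x => (x, (xs.count x : Int)))).map (fun x => x.1))
    (g := fun (o : List Int) (p : Int) =>
      o ++ ((pvBlk xs p).map (fun x => (x, (xs.count x : Int)))).map (fun x => x.2))]
  rw [PySem.List.foldl_append_eq_flatMap, PySem.List.foldl_append_eq_flatMap]
  unfold pvSortedPos
  simp [List.map_map, Function.comp_def]

theorem pv_main (xs : List String) :
    PySem.List.sorted2 (PySem.Set.ofList xs) pvFngD (fun s => s) false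
      = (pvSortedPos xs).flatMap (fun p => pvBlk xs p) := by
  rw [pv_sorted2_eq_sorted_lex]
  apply PySem.List.sorted_eq_of_perm_of_pairwise_lt
  · -- permutation
    have hposnd : (pvSortedPos xs).Pairwise (· < ·) :=
      PySem.List.sorted_ofList_pairwise_lt (xs.map pvFngD)
    have hnd : ((pvSortedPos xs).flatMap (fun p => pvBlk xs p)).Nodup := by
      rw [List.flatMap_def, List.nodup_flatten]
      constructor
      · intro l hl
        rcases List.mem_map.1 hl with ⟨p, _, rfl⟩
        unfold pvBlk
        exact ((PySem.List.sorted_perm _ _ _)).symm.nodup (PySem.Set.nodup_ofList _)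
      · rw [List.pairwise_map]
        refine hposnd.imp_of_mem ?_
        intro p q _ _ hpq x hx hy
        have h1 := (pv_mem_blk.1 hx).2
        have h2 := (pv_mem_blk.1 hy).2
        exact absurd (h1.symm.trans h2) (ne_of_lt hpq)
    rw [List.perm_ext_iff_of_nodup hnd (PySem.Set.nodup_ofList _)]
    intro a
    rw [PySem.Set.mem_ofList, List.mem_flatMap]
    constructor
    · rintro ⟨p, _, hmem⟩
      exact (pv_mem_blk.1 hmem).1
    · intro ha
      refine ⟨pvFngD a, ?_, pv_mem_blk.2 ⟨ha, rfl⟩⟩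
      unfold pvSortedPos
      rw [PySem.List.mem_sorted, PySem.Set.mem_ofList]
      exact List.mem_map_of_mem ha
  · -- strictly increasing in the lexicographic key
    rw [List.flatMap_def, List.pairwise_flatten]
    constructor
    · intro l hl
      rcases List.mem_map.1 hl with ⟨p, _, rfl⟩
      have hsorted : (pvBlk xs p).Pairwise (· < ·) := by
        unfold pvBlk; exact PySem.List.sorted_ofList_pairwise_lt _
      refine hsorted.imp_of_mem ?_
      intro a b ha hb hab
      have h1 := (pv_mem_blk.1 ha).2
      have h2 := (pv_mem_blk.1 hb).2
      rw [Prod.Lex.toLex_lt_toLex]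
      exact Or.inr ⟨h1.trans h2.symm, hab⟩
    · rw [List.pairwise_map]
      have hposlt : (pvSortedPos xs).Pairwise (· < ·) :=
        PySem.List.sorted_ofList_pairwise_lt (xs.map pvFngD)
      refine hposlt.imp_of_mem ?_
      intro p q _ _ hpq x hx y hy
      have h1 := (pv_mem_blk.1 hx).2
      have h2 := (pv_mem_blk.1 hy).2
      rw [Prod.Lex.toLex_lt_toLex]
      exact Or.inl (by rw [h1, h2]; exact hpq)

theorem pv_B_eq (xs : List String) :
    sort_sequences_by_first_non_gap_and_consensus_alt xs
      = ((pvSortedPos xs).flatMap (fun p => pvBlk xs p),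
         (pvSortedPos xs).flatMap (fun p => (pvBlk xs p).map (fun x => (xs.count x : Int)))) := by
  unfold sort_sequences_by_first_non_gap_and_consensus_alt
  simp only [PySem.Dict.keys_counter, PySem.Dict.getD_counter]
  have h1 : PySem.List.sorted2 (PySem.Set.ofList xs) (fun s => (pvFirstNonGap s).getD 0)
      (fun s => s) false = (pvSortedPos xs).flatMap (fun p => pvBlk xs p) := pv_main xs
  rw [h1]
  congr 1
  rw [List.map_flatMap]

-- ===== VERDICT (by name: the statement is the Claim_ definition above) =====
theorem sort_sequences_by_first_non_gap_and_consensus_spec : Claim_equal_sort_sequences_by_first_non_gap_and_consensus := by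
  intro xs _ _
  unfold Spec_sort_sequences_by_first_non_gap_and_consensus
  rw [pv_A_eq, pv_B_eq]
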